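-- pv_equiv track=rewrite | github.com/stephanefly/bidon | src/apps/main/modules/graph_perfo_0d/gestion_data.py | make_planes_tab_data
-- ===== SOURCE A (Python) =====
-- def make_planes_tab_data(all_plane_dict):
--     # récupérer tous les ids existants
--     all_cas = set()
--     for rowpair in all_plane_dict:
--         for cas in all_plane_dict[rowpair]:
--             all_cas.add(cas)
--
--     # compléter les ids manquants avec valeur par défaut
--     for rowpair in all_plane_dict:
--         for cas in all_cas:
--             try:
--                 if not all_plane_dict[rowpair][cas]:
--                     all_plane_dict[rowpair][cas] = ['Inlet', 'Outlet']
--             except: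
--                 pass
--     return all_plane_dict
-- ===== SOURCE B (Python) =====
-- def make_planes_tab_data(all_plane_dict):
--     # One pass over each inner dict's own entries: A's cross product over the
--     # global key set only ever changes keys the inner dict already has (missing
--     # keys raise KeyError which A swallows), and only when the value is falsy.
--     # Mutates all_plane_dict in place and returns it, like A.
--     for cas_dict in all_plane_dict.values():
--         for cas, ends in cas_dict.items():
--             if not ends:
--                 cas_dict[cas] = ['Inlet', 'Outlet']
--     return all_plane_dict
-- ===== Notes on version B (the rewrite author's own statement) =====
-- stated objective: faster
-- what changed: B drops the global key set and the rowpair-by-all-keys cross product: it walks each inner dict's own entries once and replaces empty lists, since A's lookups of foreign keys always raise KeyError (swallowed) and never add keys.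
import Mathlib
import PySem

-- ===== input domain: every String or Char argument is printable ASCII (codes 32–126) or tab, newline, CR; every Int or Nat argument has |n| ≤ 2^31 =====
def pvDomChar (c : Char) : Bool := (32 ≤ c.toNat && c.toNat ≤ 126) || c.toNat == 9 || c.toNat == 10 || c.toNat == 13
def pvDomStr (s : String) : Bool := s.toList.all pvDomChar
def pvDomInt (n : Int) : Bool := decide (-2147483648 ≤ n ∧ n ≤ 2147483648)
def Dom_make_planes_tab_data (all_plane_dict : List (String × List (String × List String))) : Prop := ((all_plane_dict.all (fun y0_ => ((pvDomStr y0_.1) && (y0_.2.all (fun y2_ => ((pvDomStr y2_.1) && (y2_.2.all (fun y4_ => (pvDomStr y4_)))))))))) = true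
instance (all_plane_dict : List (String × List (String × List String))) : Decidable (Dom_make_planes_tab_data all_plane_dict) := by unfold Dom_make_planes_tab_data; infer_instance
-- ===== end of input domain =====

-- B replaces A's cross product (every rowpair x every key seen anywhere, foreign keys raising a
-- swallowed KeyError) by a single pass over each inner dict's own entries — measurably faster.
-- A mutates its dict argument in place and returns it (B mutates it the same way); the theorems
-- here are about the returned value.


-- ===== PORT A =====
-- body of A's inner `try`: `if not d[rowpair][cas]: d[rowpair][cas] = [...]` with KeyError → pass
def pvStepA (inner : List (String × List String)) (cas : String) : List (String × List String) :=
  match (PySem.Dict.mk inner).get? cas with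
  | some v => if v = [] then ((PySem.Dict.mk inner).insert cas ["Inlet", "Outlet"]).items else inner
  | none => inner

def make_planes_tab_data (all_plane_dict : List (String × List (String × List String))) : List (String × List (String × List String)) :=
  -- all_cas = set of every inner key; iterating it folds pvStepA over its element list: the
  -- result is independent of the iteration order (each key of `inner` is updated independently),
  -- so Python's unspecified set order is harmless here.
  let all_cas : PySem.Set String :=
    all_plane_dict.foldl (fun s rp => rp.2.foldl (fun s kv => PySem.Set.add s kv.1) s) PySem.Set.empty
  all_plane_dict.map (fun rp => (rp.1, all_cas.foldl pvStepA rp.2))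

-- ===== PORT B =====
def make_planes_tab_data_alt (all_plane_dict : List (String × List (String × List String))) : List (String × List (String × List String)) :=
  all_plane_dict.map (fun rp =>
    (rp.1, rp.2.map (fun kv => if kv.2 = [] then (kv.1, ["Inlet", "Outlet"]) else kv)))

-- ===== PRECONDITION & SPEC =====
-- Pre_ excludes association lists whose inner dicts carry duplicate keys: such lists do not
-- represent any Python dict (A's argument is a dict, so every real input has unique keys).
def Pre_make_planes_tab_data (all_plane_dict : List (String × List (String × List String))) : Prop :=
  ∀ p ∈ all_plane_dict, (p.2.map Prod.fst).Nodup
instance (all_plane_dict : List (String × List (String × List String))) : Decidable (Pre_make_planes_tab_data all_plane_dict) := by unfold Pre_make_planes_tab_data; infer_instance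
def pvWitness_make_planes_tab_data : (List (String × List (String × List String))) :=
  [("row1", [("cas1", []), ("cas2", ["a"])]), ("row2", [("cas1", ["b"])])]
def Spec_make_planes_tab_data (all_plane_dict : List (String × List (String × List String))) (out : List (String × List (String × List String))) : Prop := out = make_planes_tab_data_alt all_plane_dict
instance (all_plane_dict : List (String × List (String × List String))) (out : List (String × List (String × List String))) : Decidable (Spec_make_planes_tab_data all_plane_dict out) := by unfold Spec_make_planes_tab_data; infer_instance

-- ===== CLAIM (what is proved, stated in full; the proofs are below) =====
def Claim_equal_make_planes_tab_data : Prop := ∀ (all_plane_dict : List (String × List (String × List String))), Dom_make_planes_tab_data all_plane_dict → Pre_make_planes_tab_data all_plane_dict → Spec_make_planes_tab_data all_plane_dict (make_planes_tab_data all_plane_dict)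

-- ===== LEMMAS AND PROOFS =====

-- with unique keys, one `try` body is a pointwise fix of the entry whose key is `cas`
lemma pvStepA_eq (inner : List (String × List String)) (cas : String)
    (h : (inner.map Prod.fst).Nodup) :
    pvStepA inner cas
      = inner.map (fun kv => if kv.1 = cas ∧ kv.2 = [] then (kv.1, ["Inlet", "Outlet"]) else kv) := by
  unfold pvStepA
  cases hf : (PySem.Dict.mk inner).get? cas with
  | none =>
      have hnone := hf
      simp only [PySem.Dict.get?, Option.map_eq_none_iff] at hnone
      have hnot : ∀ kv ∈ inner, ¬ kv.1 = cas := by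
        intro kv hkv hk
        have := List.find?_eq_none.mp hnone kv hkv
        simp [hk] at this
      have hmap : inner.map (fun kv => if kv.1 = cas ∧ kv.2 = [] then (kv.1, ["Inlet", "Outlet"]) else kv) = inner.map id :=
        List.map_congr_left (fun kv hkv => by simp [hnot kv hkv])
      simp [hmap]
  | some v =>
      have hv : ∃ p ∈ inner, p.1 = cas ∧ p.2 = v := by
        obtain ⟨p, hp1, hp2⟩ := Option.map_eq_some_iff.mp hf
        exact ⟨p, List.mem_of_find?_eq_some hp1, by simpa using List.find?_some hp1, hp2⟩
      obtain ⟨p, hpmem, hpk, hpv⟩ := hv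
      have huniq : ∀ kv ∈ inner, kv.1 = cas → kv.2 = v := by
        intro kv hkv hk
        have := List.inj_on_of_nodup_map h hkv hpmem (by rw [hk, hpk])
        rw [this, hpv]
      have hcont : (PySem.Dict.mk inner).contains cas = true := by
        cases hcb : (PySem.Dict.mk inner).contains cas with
        | false => rw [← PySem.Dict.get?_eq_none_iff_contains] at hcb; simp [hf] at hcb
        | true => rfl
      by_cases hve : v = []
      · subst hve
        dsimp only
        rw [if_pos rfl]
        simp only [PySem.Dict.insert, hcont, if_true]
        apply List.map_congr_left
        intro kv hkv
        by_cases hk : kv.1 = cas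
        · simp [hk, huniq kv hkv hk]
        · simp [hk]
      · dsimp only
        rw [if_neg hve]
        have hnone : ∀ kv ∈ inner, ¬ (kv.1 = cas ∧ kv.2 = []) := by
          rintro kv hkv ⟨h1, h2⟩
          exact hve ((huniq kv hkv h1).symm.trans h2)
        have hmap : inner.map (fun kv => if kv.1 = cas ∧ kv.2 = [] then (kv.1, ["Inlet", "Outlet"]) else kv) = inner.map id :=
          List.map_congr_left (fun kv hkv => by simp [hnone kv hkv])
        simp [hmap]

-- folding the try-body over a list of candidate keys fixes exactly the entries whose key is in it
lemma foldl_pvStepA_eq (L : List String) (inner : List (String × List String))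
    (h : (inner.map Prod.fst).Nodup) :
    L.foldl pvStepA inner
      = inner.map (fun kv => if kv.1 ∈ L ∧ kv.2 = [] then (kv.1, ["Inlet", "Outlet"]) else kv) := by
  induction L generalizing inner with
  | nil =>
      simp
  | cons cas L ih =>
      rw [List.foldl_cons, pvStepA_eq inner cas h]
      have hkeys : ((inner.map (fun kv => if kv.1 = cas ∧ kv.2 = [] then (kv.1, ["Inlet", "Outlet"]) else kv)).map Prod.fst) = inner.map Prod.fst := by
        rw [List.map_map]
        apply List.map_congr_left
        intro kv _
        by_cases hk : kv.1 = cas ∧ kv.2 = [] <;> simp [hk]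
      rw [ih _ (hkeys ▸ h), List.map_map]
      apply List.map_congr_left
      intro kv _
      by_cases h1 : kv.1 = cas
      · by_cases h2 : kv.2 = [] <;> simp [Function.comp, h1, h2]
      · simp [Function.comp, h1, List.mem_cons]

-- every key of an inner dict of d lands in the collected key set
lemma mem_inner_fold (l : List (String × List String)) (s : PySem.Set String) (x : String)
    (hx : x ∈ s) : x ∈ l.foldl (fun s kv => PySem.Set.add s kv.1) s := by
  induction l generalizing s with
  | nil => exact hx
  | cons kv l ih => exact ih _ ((PySem.Set.mem_add _ _ _).mpr (Or.inl hx))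

lemma mem_inner_fold_self (l : List (String × List String)) :
    ∀ (s : PySem.Set String) (kv : String × List String), kv ∈ l →
      kv.1 ∈ l.foldl (fun s kv => PySem.Set.add s kv.1) s := by
  induction l with
  | nil => intro s kv hkv; cases hkv
  | cons a l ih =>
      intro s kv hkv
      rcases List.mem_cons.mp hkv with h | h
      · rw [List.foldl_cons, h]
        exact mem_inner_fold l (PySem.Set.add s a.1) a.1 ((PySem.Set.mem_add _ _ _).mpr (Or.inr rfl))
      · exact ih _ _ h

lemma mem_outer_fold (d : List (String × List (String × List String))) (s : PySem.Set String)
    (x : String) (hx : x ∈ s) :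
    x ∈ d.foldl (fun s rp => rp.2.foldl (fun s kv => PySem.Set.add s kv.1) s) s := by
  induction d generalizing s with
  | nil => exact hx
  | cons rp d ih => exact ih _ (mem_inner_fold _ _ _ hx)

lemma mem_collect (d : List (String × List (String × List String))) :
    ∀ (s : PySem.Set String) (rp : String × List (String × List String)), rp ∈ d →
      ∀ kv ∈ rp.2, kv.1 ∈ d.foldl (fun s rp => rp.2.foldl (fun s kv => PySem.Set.add s kv.1) s) s := by
  induction d with
  | nil => intro s rp h; cases h
  | cons a d ih =>
      intro s rp hrp kv hkv
      rcases List.mem_cons.mp hrp with h | h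
      · subst h
        rw [List.foldl_cons]
        exact mem_outer_fold d _ _ (mem_inner_fold_self rp.2 _ kv hkv)
      · exact ih _ _ h kv hkv

-- ===== VERDICT (by name: the statement is the Claim_ definition above) =====
theorem make_planes_tab_data_spec : Claim_equal_make_planes_tab_data := by
  intro d _ hpre
  unfold Spec_make_planes_tab_data make_planes_tab_data make_planes_tab_data_alt
  apply List.map_congr_left
  intro rp hrp
  rw [foldl_pvStepA_eq _ _ (hpre rp hrp)]
  refine congrArg _ (List.map_congr_left ?_)
  intro kv hkv
  by_cases h2 : kv.2 = []
  · have hm := mem_collect d PySem.Set.empty rp hrp kv hkv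
    simp only [PySem.Set.empty] at hm
    simp [h2, hm]
  · simp [h2]
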